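-- pv_equiv track=rewrite | github.com/activus-d/Codewars_Python | compute_cube_as_sums.py | find_summands
-- ===== SOURCE A (Python) =====
-- def find_summands(n):
--     # find the odd numbers after n and add them to a list
--     if n == 1:
--         return [1]
--
--     odd_num_list = []
--     last_three_items = []
--
--     for i in range(n, n * n * n):
--         # check if i is odd and append it to odd_num_list
--         if i % 2 == 1:
--             odd_num_list.append(i)
--
--         if len(odd_num_list) > n:
--             odd_num_list.pop(0)  # Remove the first element to maintain a rolling window of size n
--
--         if sum(odd_num_list) == n * n * n:
--             return odd_num_list.copy()
--
--     return None  # Return None if no such summands are found within the range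
-- ===== SOURCE B (Python) =====
-- def find_summands(n):
--     # n**3 is the sum of the n consecutive odd numbers starting at n*n - n + 1
--     if n < 1:
--         return None
--     start = n * n - n + 1
--     return [start + 2 * i for i in range(n)]
-- ===== Notes on version B (the rewrite author's own statement) =====
-- stated objective: faster
-- what changed: Replaces the O(n^3)-iteration rolling-window search with the closed form: the n consecutive odd numbers starting at n*n-n+1.
import Mathlib
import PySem

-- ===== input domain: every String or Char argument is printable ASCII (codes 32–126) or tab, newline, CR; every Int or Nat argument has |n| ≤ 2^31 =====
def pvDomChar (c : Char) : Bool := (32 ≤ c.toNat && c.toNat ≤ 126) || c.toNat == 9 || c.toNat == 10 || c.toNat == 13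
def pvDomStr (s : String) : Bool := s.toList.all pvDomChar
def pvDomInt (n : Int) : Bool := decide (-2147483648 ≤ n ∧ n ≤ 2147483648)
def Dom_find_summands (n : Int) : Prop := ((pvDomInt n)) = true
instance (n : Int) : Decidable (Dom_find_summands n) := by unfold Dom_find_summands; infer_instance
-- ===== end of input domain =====

-- B replaces A's rolling-window scan of range(n, n^3) by the closed form: the n
-- consecutive odd numbers starting at n*n-n+1 (measured faster in a timing run).

-- ===== PORT A =====
-- `if i % 2 == 1: odd_num_list.append(i)`
def appOdd (odds : List Int) (i : Int) : List Int :=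
  if PySem.Int.mod i 2 == 1 then odds ++ [i] else odds

-- `if len(odd_num_list) > n: odd_num_list.pop(0)`
def popWin (n : Int) (o1 : List Int) : List Int :=
  if (o1.length : Int) > n then o1.tail else o1

-- one loop iteration body (before the sum test)
def stepA (n : Int) (odds : List Int) (i : Int) : List Int := popWin n (appOdd odds i)

-- the for-loop with its early return (A's unused `last_three_items` is omitted)
def goA (n : Int) : List Int → List Int → Option (List Int)
  | [], _ => none
  | i :: rest, odds =>
    if (stepA n odds i).sum == n * n * n then some (stepA n odds i)
    else goA n rest (stepA n odds i)

def find_summands (n : Int) : Option (List Int) :=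
  if n == 1 then some [1]
  else goA n (PySem.List.pyRange n (n * n * n) 1) []

-- ===== PORT B =====
def find_summands_alt (n : Int) : Option (List Int) :=
  if n < 1 then none
  else some ((PySem.List.pyRange 0 n 1).map (fun i => n * n - n + 1 + 2 * i))

-- ===== PRECONDITION & SPEC =====
def Spec_find_summands (n : Int) (out : Option (List Int)) : Prop := out = find_summands_alt n
instance (n : Int) (out : Option (List Int)) : Decidable (Spec_find_summands n out) := by unfold Spec_find_summands; infer_instance

-- ===== CLAIM (what is proved, stated in full; the proofs are below) =====
def Claim_equal_find_summands : Prop := ∀ (n : Int), Dom_find_summands n → Spec_find_summands n (find_summands n)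

-- ===== LEMMAS AND PROOFS =====

-- the list of `len` consecutive odd-spaced integers starting at `a`
def wl (a : Int) (len : Nat) : List Int := (List.range len).map (fun i : Nat => a + 2 * (i : Int))

theorem wl_snoc (a : Int) (len : Nat) : wl a (len + 1) = wl a len ++ [a + 2 * len] := by
  simp [wl, List.range_succ]

theorem wl_length (a : Int) (len : Nat) : (wl a len).length = len := by simp [wl]

theorem wl_cons (a : Int) (len : Nat) : wl a (len + 1) = a :: wl (a + 2) len := by
  induction len generalizing a with
  | zero => simp [wl]
  | succ p ih =>
    rw [wl_snoc, ih, wl_snoc, List.cons_append]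
    push_cast
    ring_nf

theorem wl_tail (a : Int) (len : Nat) : (wl a (len + 1)).tail = wl (a + 2) len := by
  rw [wl_cons, List.tail_cons]

theorem wl_sum (a : Int) (len : Nat) :
    (wl a len).sum = (len : Int) * a + (len : Int) * ((len : Int) - 1) := by
  induction len with
  | zero => simp [wl]
  | succ m ih =>
    rw [wl_snoc, List.sum_append, ih, List.sum_singleton]
    push_cast
    ring

-- the window A holds after the first k iterations (i = n .. n+k-1), for n = m ≥ 2
def stt (m : Nat) (k : Nat) : List Int :=
  if (k + m % 2) / 2 ≤ m then wl ((m : Int) + 1 - (m % 2 : Nat)) ((k + m % 2) / 2)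
  else wl ((m : Int) + 1 - (m % 2 : Nat) + 2 * ((((k + m % 2) / 2 : Nat) : Int) - m)) m

theorem stt_zero (m : Nat) : stt m 0 = [] := by
  have h : (0 + m % 2) / 2 = 0 := by omega
  have h2 : (0 + m % 2) / 2 ≤ m := by omega
  unfold stt
  rw [if_pos h2, h]
  simp [wl]

theorem stt_eq_of_le (m k : Nat) (h : (k + m % 2) / 2 ≤ m) :
    stt m k = wl ((m : Int) + 1 - (m % 2 : Nat)) ((k + m % 2) / 2) := by
  unfold stt; rw [if_pos h]

theorem stt_eq_of_ge (m k : Nat) (h : m ≤ (k + m % 2) / 2) :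
    stt m k = wl ((m : Int) + 1 - (m % 2 : Nat) + 2 * ((((k + m % 2) / 2 : Nat) : Int) - m)) m := by
  unfold stt
  rcases Nat.lt_or_ge m ((k + m % 2) / 2) with hlt | hge
  · rw [if_neg (by omega)]
  · have he : (k + m % 2) / 2 = m := by omega
    rw [he, if_pos le_rfl]
    norm_num

theorem stt_length_le (m k : Nat) : (stt m k).length ≤ m := by
  unfold stt
  split
  · rw [wl_length]; assumption
  · rw [wl_length]

theorem mod_cast_two (j : Nat) : PySem.Int.mod ((j : Nat) : Int) 2 = ((j % 2 : Nat) : Int) := by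
  exact_mod_cast PySem.Int.mod_natCast j 2

theorem appOdd_odd (odds : List Int) (j : Nat) (h : j % 2 = 1) :
    appOdd odds ((j : Nat) : Int) = odds ++ [((j : Nat) : Int)] := by
  unfold appOdd
  rw [mod_cast_two, h, if_pos (by norm_num)]

theorem appOdd_even (odds : List Int) (j : Nat) (h : j % 2 = 0) :
    appOdd odds ((j : Nat) : Int) = odds := by
  unfold appOdd
  rw [mod_cast_two, h, if_neg (by norm_num)]

theorem popWin_le (m : Nat) (o1 : List Int) (h : o1.length ≤ m) :
    popWin (m : Int) o1 = o1 := by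
  unfold popWin
  rw [if_neg (by push_cast; omega)]

theorem popWin_gt (m : Nat) (o1 : List Int) (h : m < o1.length) :
    popWin (m : Int) o1 = o1.tail := by
  unfold popWin
  rw [if_pos (by push_cast; omega)]

-- one iteration of A's loop advances the window description
theorem stepA_stt (m k : Nat) (hm : 2 ≤ m) :
    stepA (m : Int) (stt m k) ((m : Int) + (k : Int)) = stt m (k + 1) := by
  have hcast : ((m : Int) + (k : Int)) = ((m + k : Nat) : Int) := by push_cast; ring
  rw [stepA, hcast]
  by_cases hpar : (m + k) % 2 = 1
  · -- i odd: append, maybe pop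
    have hc : (k + 1 + m % 2) / 2 = (k + m % 2) / 2 + 1 := by omega
    have hi : ((m + k : Nat) : Int) = ((m : Int) + 1 - (m % 2 : Nat)) + 2 * (((k + m % 2) / 2 : Nat) : Int) := by
      have h2 : 2 * ((k + m % 2) / 2) = k + m % 2 - 1 := by omega
      push_cast
      omega
    by_cases hcm : (k + m % 2) / 2 + 1 ≤ m
    · -- growing phase: append, no pop
      rw [stt_eq_of_le m k (by omega), appOdd_odd _ _ hpar, hi, ← wl_snoc,
        popWin_le m _ (by rw [wl_length]; omega), stt_eq_of_le m (k + 1) (by omega), hc]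
    · -- sliding phase: append then pop(0)
      have hge : m ≤ (k + m % 2) / 2 := by omega
      rw [stt_eq_of_ge m k hge, appOdd_odd _ _ hpar,
        show ((m + k : Nat) : Int)
            = ((m : Int) + 1 - (m % 2 : Nat) + 2 * ((((k + m % 2) / 2 : Nat) : Int) - m)) + 2 * (m : Int) from by
          rw [hi]; push_cast; ring,
        ← wl_snoc, popWin_gt m _ (by rw [wl_length]; omega), wl_tail,
        stt_eq_of_ge m (k + 1) (by omega), hc]
      congr 1
      push_cast
      ring
  · -- i even: window unchanged
    have hpar0 : (m + k) % 2 = 0 := by omega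
    have hc : (k + 1 + m % 2) / 2 = (k + m % 2) / 2 := by omega
    rw [appOdd_even _ _ hpar0, popWin_le m _ (stt_length_le m k)]
    unfold stt
    rw [hc]

theorem sq_mod_two (m : Nat) : m * m % 2 = m % 2 := by
  rcases Nat.even_or_odd m with h | h
  · obtain ⟨t, ht⟩ := h; subst ht
    have h2 : (t + t) * (t + t) = 2 * (2 * t * t) := by ring
    omega
  · obtain ⟨t, ht⟩ := h; subst ht
    have h2 : (2 * t + 1) * (2 * t + 1) = 2 * (2 * t * t + 2 * t) + 1 := by ring
    omega


theorem stt_final' (m q : Nat) (hm : 2 ≤ m) (hq2 : q % 2 = m % 2) (h4 : 2 * m ≤ q) :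
    stt m q = wl ((q : Int) - m + 1) m := by
  have hge : m ≤ (q + m % 2) / 2 := by omega
  rw [stt_eq_of_ge m q hge]
  congr 1
  have h2 : 2 * ((q + m % 2) / 2) = q + m % 2 := by omega
  push_cast
  omega

theorem stt_final (m : Nat) (hm : 2 ≤ m) :
    stt m (m * m) = wl ((m : Int) * m - m + 1) m := by
  have h4 : 2 * m ≤ m * m := by nlinarith
  rw [stt_final' m (m * m) hm (sq_mod_two m) h4]
  congr 1

theorem grow_bound (m c : Nat) (hm : 2 ≤ m) (hc : c ≤ m) (hc2 : 2 * c ≤ m * m - 1 + m % 2) :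
    (c : Int) * ((m : Int) + 1 - (m % 2 : Nat)) + (c : Int) * ((c : Int) - 1) ≠ (m : Int) * m * m := by
  apply ne_of_lt
  rcases Nat.lt_or_ge m 3 with h3 | h3
  · have hm2 : m = 2 := by omega
    subst hm2
    have hc1 : c ≤ 1 := by omega
    interval_cases c <;> norm_num
  · have hcI : (c : Int) ≤ m := by exact_mod_cast hc
    have hmI : (3 : Int) ≤ m := by exact_mod_cast h3
    have hprI : (0 : Int) ≤ ((m % 2 : Nat) : Int) := by positivity
    have hcI0 : (0 : Int) ≤ c := by positivity
    nlinarith [mul_le_mul_of_nonneg_left hcI hcI0, mul_le_mul_of_nonneg_left hmI (mul_nonneg hcI0 hcI0)]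

theorem slide_bound (m : Nat) (s : Int) (hm : 2 ≤ m) (hs : s ≤ (m : Int) * m - m - 1) :
    (m : Int) * s + (m : Int) * ((m : Int) - 1) ≠ (m : Int) * m * m := by
  apply ne_of_lt
  have hmI : (2 : Int) ≤ m := by exact_mod_cast hm
  nlinarith [mul_le_mul_of_nonneg_left hs (by positivity : (0 : Int) ≤ (m : Int))]

-- interior iterations never hit the target sum
theorem stt_sum_ne (m k : Nat) (hm : 2 ≤ m) (hk : k ≤ m * m - 1) :
    (stt m k).sum ≠ (m : Int) * m * m := by
  obtain ⟨q, hq⟩ : ∃ q, m * m = q := ⟨_, rfl⟩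
  have hqi : ((q : Nat) : Int) = (m : Int) * m := by rw [← hq]; push_cast; ring
  have hpar : q % 2 = m % 2 := by rw [← hq]; exact sq_mod_two m
  rw [hq] at hk
  unfold stt
  split
  case isTrue h =>
    rw [wl_sum]
    exact grow_bound m ((k + m % 2) / 2) hm h (by rw [hq]; omega)
  case isFalse h =>
    rw [wl_sum]
    apply slide_bound m _ hm
    rw [← hqi]
    have h2c : 2 * ((k + m % 2) / 2) ≤ q - 2 + m % 2 := by omega
    push_cast
    omega

theorem main_loop (m : Nat) (hm : 2 ≤ m) :
    ∀ d k : Nat, k + d + 1 = m * m →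
      goA (m : Int) (PySem.List.pyRange ((m : Int) + k) ((m : Int) * m * m) 1) (stt m k) =
        some (wl ((m : Int) * m - m + 1) m) := by
  have hmI : (2 : Int) ≤ m := by exact_mod_cast hm
  intro d
  induction d with
  | zero =>
    intro k hk
    have hkI : (k : Int) + 1 = (m : Int) * m := by exact_mod_cast congrArg (Nat.cast : Nat → Int) (by omega : k + 1 = m * m)
    have hklt : ((m : Int) + k) < (m : Int) * m * m := by nlinarith
    rw [PySem.List.pyRange_one_cons hklt]
    simp only [goA]
    rw [stepA_stt m k hm, show k + 1 = m * m from by omega, stt_final m hm]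
    rw [if_pos (by rw [beq_iff_eq, wl_sum]; push_cast; ring)]
  | succ d ih =>
    intro k hk
    have hkI : (k : Int) + (d : Int) + 2 = (m : Int) * m := by exact_mod_cast congrArg (Nat.cast : Nat → Int) (by omega : k + d + 2 = m * m)
    have hklt : ((m : Int) + k) < (m : Int) * m * m := by nlinarith [Int.natCast_nonneg d]
    rw [PySem.List.pyRange_one_cons hklt]
    simp only [goA]
    rw [stepA_stt m k hm]
    rw [if_neg (by rw [beq_iff_eq]; exact stt_sum_ne m (k + 1) hm (by omega))]
    rw [show ((m : Int) + k + 1) = (m : Int) + ((k + 1 : Nat) : Int) from by push_cast; ring]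
    exact ih (k + 1) (by omega)

theorem alt_eq (m : Nat) (hm : 1 ≤ m) :
    find_summands_alt (m : Int) = some (wl ((m : Int) * m - m + 1) m) := by
  unfold find_summands_alt
  rw [if_neg (by push_cast; omega)]
  congr 1
  rw [PySem.List.pyRange_one, List.map_map, show (((m : Int) - 0).toNat) = m from by omega]
  unfold wl
  apply List.map_congr_left
  intro i _
  simp only [Function.comp_apply]
  push_cast
  ring

theorem neg_case (n : Int) (h0 : n ≤ 0) : find_summands n = find_summands_alt n := by
  unfold find_summands find_summands_alt
  rw [if_neg (by rw [beq_iff_eq]; omega), if_pos (by omega),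
    PySem.List.pyRange_one_eq_nil (by nlinarith [sq_nonneg n, sq_nonneg (n + 1), sq_nonneg (n - 1)])]
  rfl

-- ===== VERDICT (by name: the statement is the Claim_ definition above) =====
theorem find_summands_spec : Claim_equal_find_summands := by
  unfold Claim_equal_find_summands
  intro n _
  unfold Spec_find_summands
  rcases le_or_gt n 0 with h0 | h0
  · exact neg_case n h0
  · by_cases h1 : n = 1
    · subst h1; decide
    · have h2 : 2 ≤ n := by omega
      lift n to Nat using (by omega) with m
      have hm : 2 ≤ m := by exact_mod_cast h2
      have hq1 : 1 ≤ m * m := Nat.mul_pos (by omega) (by omega)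
      unfold find_summands
      rw [if_neg (by rw [beq_iff_eq]; omega)]
      have hmain := main_loop m hm (m * m - 1) 0 (by rw [Nat.zero_add, Nat.sub_add_cancel hq1])
      rw [stt_zero] at hmain
      simp only [Nat.cast_zero, add_zero] at hmain
      rw [hmain, alt_eq m (by omega)]
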